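-- pv_equiv track=rewrite | github.com/AakashTiwari-nitp/NPTEL-Joy_Of_Computing_With_Python | W5P3.py | exact_count
-- ===== SOURCE A (Python) =====
-- def exact_count(para, n):
--     D = dict()
--     for word in para.split(' '):
--         if word not in D:
--             D[word] = 0
--         D[word] += 1
--     for word in D:
--         if D[word] == n:
--             return True
--     return False
-- ===== SOURCE B (Python) =====
-- def exact_count(para, n):
--     words = sorted(para.split(' '))
--     cur = words[0]
--     cnt = 0
--     for w in words:
--         if w == cur:
--             cnt += 1
--         else:
--             if cnt == n:
--                 return True
--             cur, cnt = w, 1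
--     return cnt == n
-- ===== Notes on version B (the rewrite author's own statement) =====
-- stated objective: alternative
-- what changed: B replaces A's dict-based counting (build a counter, then scan its values) by sorting the split word list and scanning runs of consecutive equal words, testing each run length against n with no dict at all.
import Mathlib
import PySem

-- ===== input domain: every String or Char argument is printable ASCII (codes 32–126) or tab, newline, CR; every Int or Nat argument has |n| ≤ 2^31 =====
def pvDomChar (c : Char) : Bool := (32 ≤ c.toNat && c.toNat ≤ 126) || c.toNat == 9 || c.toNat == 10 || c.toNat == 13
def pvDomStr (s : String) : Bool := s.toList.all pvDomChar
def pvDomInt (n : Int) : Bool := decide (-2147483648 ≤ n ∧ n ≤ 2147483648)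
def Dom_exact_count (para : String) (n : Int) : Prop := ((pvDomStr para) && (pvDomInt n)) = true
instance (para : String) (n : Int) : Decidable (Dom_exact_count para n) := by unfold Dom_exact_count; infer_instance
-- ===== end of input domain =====

-- B replaces A's dict-counting pass by sorting the word list and scanning runs of equal
-- words (objective: alternative decomposition, no dict; not claimed faster).

-- ===== PORT A =====
-- A: build a counting dict over para.split(' '), then return True iff some key has count n.
def exact_count (para : String) (n : Int) : Bool :=
  let D : PySem.Dict String Int :=
    ((PySem.Str.split? para " ").getD []).foldl
      (fun d word =>
        (if d.contains word then d else d.insert word 0).modify word 0 (fun v => v + 1))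
      PySem.Dict.empty
  D.keys.any (fun word => D.getD word 0 == n)

-- ===== PORT B =====
-- B's loop: walk the sorted word list, counting the current run; on a word change test the
-- finished run's length against n, and test the last run after the loop.
def runScan (n : Int) (cur : String) (cnt : Int) : List String → Bool
  | [] => cnt == n
  | w :: ws =>
      if w == cur then runScan n cur (cnt + 1) ws
      else if cnt == n then true else runScan n w 1 ws

def exact_count_alt (para : String) (n : Int) : Bool :=
  let words := PySem.List.sorted ((PySem.Str.split? para " ").getD []) (fun x => x) false
  runScan n (words.headD "") 0 words

-- ===== PRECONDITION & SPEC =====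
def Spec_exact_count (para : String) (n : Int) (out : Bool) : Prop := out = exact_count_alt para n
instance (para : String) (n : Int) (out : Bool) : Decidable (Spec_exact_count para n out) := by unfold Spec_exact_count; infer_instance

-- ===== CLAIM (what is proved, stated in full; the proofs are below) =====
def Claim_equal_exact_count : Prop := ∀ (para : String) (n : Int), Dom_exact_count para n → Spec_exact_count para n (exact_count para n)

-- ===== LEMMAS AND PROOFS =====

-- A's loop body: the "if word not in D: D[word] = 0" step is absorbed by the increment.
lemma stepA_eq (d : PySem.Dict String Int) (w : String) :
    (if d.contains w then d else d.insert w 0).modify w 0 (fun v => v + 1)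
      = d.modify w 0 (fun v => v + 1) := by
  by_cases h : d.contains w = true
  · simp [h]
  · have h' : d.contains w = false := by simpa using h
    simp [h', PySem.Dict.modify, PySem.Dict.getD_insert_self,
      PySem.Dict.insert_insert_self, PySem.Dict.getD_of_not_contains d 0 h']

lemma foldA_eq_counter (ws : List String) :
    ws.foldl
      (fun d word =>
        (if d.contains word then d else d.insert word 0).modify word 0 (fun v => v + 1))
      PySem.Dict.empty = PySem.Dict.counter ws := by
  rw [PySem.Dict.counter_eq_foldl]
  congr 1
  funext d w
  exact stepA_eq d w

lemma A_spec (ws : List String) (n : Int) :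
    ((PySem.Dict.counter ws).keys.any (fun w => (PySem.Dict.counter ws).getD w 0 == n)) = true
      ↔ ∃ w ∈ ws, (ws.count w : Int) = n := by
  simp [PySem.Dict.keys_counter, List.any_eq_true, PySem.Set.mem_ofList,
    PySem.Dict.getD_counter]

-- Scan invariant over a sorted tail: cnt occurrences of cur already seen, all remaining ≥ cur.
lemma runScan_sorted (n : Int) (s : List String) (hp : s.Pairwise (· ≤ ·)) :
    ∀ (cur : String) (cnt : Int), (∀ x ∈ s, cur ≤ x) →
      (runScan n cur cnt s = true
        ↔ (cnt + (s.count cur : Int) = n ∨ ∃ w ∈ s, w ≠ cur ∧ (s.count w : Int) = n)) := by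
  induction hp with
  | nil =>
      intro cur cnt _
      simp [runScan]
  | @cons a l ha hl ih =>
      intro cur cnt hcur
      by_cases hac : a = cur
      · subst hac
        rw [runScan, if_pos (by simp)]
        rw [ih a (cnt + 1) ha]
        constructor
        · rintro (h | ⟨w, hw, hne, hc⟩)
          · left; rw [List.count_cons_self]; push_cast; omega
          · right
            exact ⟨w, List.mem_cons_of_mem _ hw, hne,
              by rw [List.count_cons_of_ne (fun h => hne h.symm)]; exact hc⟩
        · rintro (h | ⟨w, hw, hne, hc⟩)
          · left; rw [List.count_cons_self] at h; push_cast at h ⊢; omega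
          · rcases List.mem_cons.mp hw with rfl | hw'
            · exact absurd rfl hne
            · right
              exact ⟨w, hw', hne,
                by rw [List.count_cons_of_ne (fun h => hne h.symm)] at hc; exact hc⟩
      · have hlt : cur < a := lt_of_le_of_ne (hcur a (List.mem_cons_self)) (fun h => hac h.symm)
        have hnmem : cur ∉ a :: l := by
          intro hm
          rcases List.mem_cons.mp hm with rfl | hm'
          · exact absurd rfl hac
          · exact absurd rfl (ne_of_gt (lt_of_lt_of_le hlt (ha cur hm')))
        have hcount0 : (a :: l).count cur = 0 := List.count_eq_zero.mpr hnmem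
        rw [runScan, if_neg (by simp [hac])]
        by_cases hcnt : cnt = n
        · rw [if_pos (by simp [hcnt])]
          simp only [hcount0]
          constructor
          · intro _; left; push_cast; omega
          · intro _; trivial
        · rw [if_neg (by simp [hcnt])]
          rw [ih a 1 ha]
          simp only [hcount0]
          constructor
          · rintro (h | ⟨w, hw, hne, hc⟩)
            · right
              refine ⟨a, List.mem_cons_self, hac, ?_⟩
              rw [List.count_cons_self]; push_cast at h ⊢; omega
            · right
              have hwcur : w ≠ cur := by
                intro rfl'
                exact hnmem (List.mem_cons_of_mem _ (rfl' ▸ hw))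
              refine ⟨w, List.mem_cons_of_mem _ hw, hwcur, ?_⟩
              rw [List.count_cons_of_ne (fun h => hne h.symm)]; exact hc
          · rintro (h | ⟨w, hw, hne, hc⟩)
            · exact absurd (by push_cast at h; omega) hcnt
            · rcases List.mem_cons.mp hw with rfl | hw'
              · left; rw [List.count_cons_self] at hc; push_cast at hc ⊢; omega
              · by_cases hwa : w = a
                · subst hwa
                  left; rw [List.count_cons_self] at hc; push_cast at hc ⊢; omega
                · right
                  refine ⟨w, hw', hwa, ?_⟩
                  rw [List.count_cons_of_ne (fun h => hwa h.symm)] at hc; exact hc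

lemma runScan_spec (n : Int) (s : List String) (hp : s.Pairwise (· ≤ ·)) (hne : s ≠ []) :
    runScan n (s.headD "") 0 s = true ↔ ∃ w ∈ s, (s.count w : Int) = n := by
  obtain ⟨c, t, rfl⟩ := List.exists_cons_of_ne_nil hne
  have hcur : ∀ x ∈ c :: t, c ≤ x := by
    intro x hx
    rcases List.mem_cons.mp hx with rfl | hx'
    · exact le_refl x
    · exact List.rel_of_pairwise_cons hp hx'
  rw [show (c :: t).headD "" = c from rfl, runScan_sorted n (c :: t) hp c 0 hcur]
  constructor
  · rintro (h | ⟨w, hw, _, hc⟩)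
    · exact ⟨c, List.mem_cons_self, by omega⟩
    · exact ⟨w, hw, hc⟩
  · rintro ⟨w, hw, hc⟩
    by_cases hwc : w = c
    · left; subst hwc; omega
    · right; exact ⟨w, hw, hwc, hc⟩

-- para.split(' ') is never empty.
lemma splitOn_go_ne_nil (sep : List Char) :
    ∀ (fuel : Nat) (l cur : List Char) (acc : List (List Char)),
      PySem.Chars.splitOn.go sep fuel l cur acc ≠ [] := by
  intro fuel
  induction fuel with
  | zero =>
      intro l cur acc
      rw [PySem.Chars.splitOn.go]
      simp
  | succ f ih =>
      intro l cur acc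
      cases l with
      | nil =>
          rw [PySem.Chars.splitOn.go]
          simp
          omega
      | cons c rest =>
          rw [PySem.Chars.splitOn.go]
          by_cases h : sep.isPrefixOf (c :: rest) = true
          · rw [if_pos h]; exact ih _ _ _
          · rw [if_neg h]; exact ih _ _ _

lemma words_ne_nil (para : String) : (PySem.Str.split? para " ").getD [] ≠ [] := by
  have h : PySem.Chars.splitOn para.toList [' '] ≠ [] := splitOn_go_ne_nil _ _ _ _ _
  simp [PySem.Str.split?, PySem.Chars.split?, List.isEmpty]
  intro hmap
  exact h hmap

-- ===== VERDICT (by name: the statement is the Claim_ definition above) =====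
theorem exact_count_spec : Claim_equal_exact_count := by
  intro para n _
  unfold Spec_exact_count exact_count exact_count_alt
  rw [foldA_eq_counter]
  have hne : (PySem.Str.split? para " ").getD [] ≠ [] := words_ne_nil para
  set ws : List String := (PySem.Str.split? para " ").getD [] with hws
  set s : List String := PySem.List.sorted ws (fun x => x) false with hs
  have hperm : s.Perm ws := PySem.List.sorted_perm ws (fun x => x) false
  have hpw : s.Pairwise (· ≤ ·) := PySem.List.sorted_pairwise ws (fun x => x)
  have hsne : s ≠ [] := by
    intro h0
    rw [h0] at hperm
    exact hne hperm.symm.eq_nil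
  rw [Bool.eq_iff_iff, A_spec, runScan_spec n s hpw hsne]
  constructor
  · rintro ⟨w, hw, hc⟩
    exact ⟨w, hperm.mem_iff.mpr hw, by rw [hperm.count_eq]; exact hc⟩
  · rintro ⟨w, hw, hc⟩
    exact ⟨w, hperm.mem_iff.mp hw, by rw [← hperm.count_eq]; exact hc⟩
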